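-- pv_equiv track=rewrite | github.com/teshchaudhary/DSA | String/LeftMostNonRepeatingCharacter.py | fnr1
-- ===== SOURCE A (Python) =====
-- def fnr1(s):
--     for i in range(len(s)):
--         flag = False
--         for j in range(i+1, len(s)):
--             if s[i] == s[j]:
--                 flag = True
--                 break
--
--         if flag == False:
--             return i
--
--     return -1
-- ===== SOURCE B (Python) =====
-- def fnr1(s):
--     seen = set()
--     ans = -1
--     for i in range(len(s) - 1, -1, -1):
--         c = s[i]
--         if c not in seen:
--             ans = i
--         seen.add(c)
--     return ans
-- ===== Notes on version B (the rewrite author's own statement) =====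
-- stated objective: faster
-- what changed: Replaced the quadratic forward scan with a nested duplicate search by a single right-to-left pass that maintains a set of characters seen so far and keeps the latest (hence leftmost) index whose character is not in the set.
import Mathlib
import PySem

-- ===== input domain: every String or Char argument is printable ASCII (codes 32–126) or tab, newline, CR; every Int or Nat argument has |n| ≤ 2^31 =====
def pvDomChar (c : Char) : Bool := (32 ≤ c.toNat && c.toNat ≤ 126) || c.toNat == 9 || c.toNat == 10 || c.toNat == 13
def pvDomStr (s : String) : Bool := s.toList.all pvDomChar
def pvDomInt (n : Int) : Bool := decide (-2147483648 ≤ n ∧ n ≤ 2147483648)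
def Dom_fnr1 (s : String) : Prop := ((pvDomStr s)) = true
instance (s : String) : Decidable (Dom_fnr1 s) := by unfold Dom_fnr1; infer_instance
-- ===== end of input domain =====

-- B replaces A's quadratic nested duplicate search by a linear right-to-left pass with a seen-set; faster (asymptotic).


-- ===== PORT A =====
-- inner loop: for j in range(i+1, len(s)): if s[i] == s[j]: flag = True; break
def fnr1Inner (cs : List Char) (i : Int) : List Int → Bool
  | [] => false
  | j :: rest =>
    if PySem.List.pyGetD cs i ' ' == PySem.List.pyGetD cs j ' ' then true
    else fnr1Inner cs i rest

-- outer loop: for i in range(len(s)): … if flag == False: return i; fall through to -1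
def fnr1Outer (cs : List Char) : List Int → Int
  | [] => -1
  | i :: rest =>
    if fnr1Inner cs i (PySem.List.pyRange (i + 1) (cs.length : Int) 1) = false then i
    else fnr1Outer cs rest

def fnr1 (s : String) : Int :=
  fnr1Outer s.toList (PySem.List.pyRange 0 (s.toList.length : Int) 1)

-- ===== PORT B =====
-- right-to-left pass: for i in range(len(s)-1, -1, -1): if s[i] not in seen: ans = i; seen.add(s[i])
def fnr1AltStep (cs : List Char) (st : PySem.Set Char × Int) (i : Int) : PySem.Set Char × Int :=
  let c := PySem.List.pyGetD cs i ' '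
  let ans := if PySem.Set.contains st.1 c then st.2 else i
  (PySem.Set.add st.1 c, ans)

def fnr1_alt (s : String) : Int :=
  let cs := s.toList
  ((PySem.List.pyRange ((cs.length : Int) - 1) (-1) (-1)).foldl (fnr1AltStep cs)
    (PySem.Set.empty, -1)).2

-- ===== PRECONDITION & SPEC =====
def Spec_fnr1 (s : String) (out : Int) : Prop := out = fnr1_alt s
instance (s : String) (out : Int) : Decidable (Spec_fnr1 s out) := by unfold Spec_fnr1; infer_instance

-- ===== CLAIM (what is proved, stated in full; the proofs are below) =====
def Claim_equal_fnr1 : Prop := ∀ (s : String), Dom_fnr1 s → Spec_fnr1 s (fnr1 s)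

-- ===== LEMMAS AND PROOFS =====
-- common specification: index (within the list) of the first element not occurring later, -1 if none
def specF : List Char → Int
  | [] => -1
  | c :: rest => if rest.contains c then (if specF rest = -1 then -1 else specF rest + 1) else 0

-- E cs i = the answer for the suffix starting at i, expressed as an absolute index
def pvE (cs : List Char) (i : Nat) : Int :=
  if specF (cs.drop i) = -1 then -1 else specF (cs.drop i) + i

-- specF is -1 or nonnegative
lemma specF_ne_neg_one_iff (l : List Char) : specF l = -1 ∨ 0 ≤ specF l := by
  induction l with
  | nil => left; rfl
  | cons c rest ih =>
    simp only [specF]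
    split_ifs with h1 h2
    · left; rfl
    · right; rcases ih with h | h <;> omega
    · right; omega

-- pvE at i in terms of pvE at i+1
lemma pvE_succ (cs : List Char) (i : Nat) (h : i < cs.length) :
    pvE cs i = if (cs.drop (i + 1)).contains cs[i] then pvE cs (i + 1) else (i : Int) := by
  unfold pvE
  rw [show cs.drop i = cs[i] :: cs.drop (i + 1) from (List.getElem_cons_drop h).symm]
  simp only [specF]
  rcases specF_ne_neg_one_iff (cs.drop (i + 1)) with h0 | h0 <;>
    split_ifs with h1 h2 h3 <;> push_cast <;> omega

-- the inner loop of A decides membership of cs[i] in cs.drop a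
lemma inner_eq (cs : List Char) (i a : Nat) (hi : i < cs.length) (ha : a ≤ cs.length) :
    fnr1Inner cs (i : Int) (PySem.List.pyRange (a : Int) (cs.length : Int) 1)
      = (cs.drop a).contains cs[i] := by
  by_cases hlt : a < cs.length
  · rw [PySem.List.pyRange_one_cons (by exact_mod_cast hlt)]
    have hgi : PySem.List.pyGetD cs (i : Int) ' ' = cs[i] := by
      simp [PySem.List.pyGetD_natCast, List.getD_eq_getElem?_getD, hi]
    have hga : PySem.List.pyGetD cs (a : Int) ' ' = cs[a] := by
      simp [PySem.List.pyGetD_natCast, List.getD_eq_getElem?_getD, hlt]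
    have hdropa : cs.drop a = cs[a] :: cs.drop (a + 1) := (List.getElem_cons_drop hlt).symm
    have hcast : ((a : Int) + 1) = ((a + 1 : Nat) : Int) := by push_cast; ring
    rw [hdropa, List.contains_cons]
    simp only [fnr1Inner, hgi, hga]
    by_cases he : cs[i] = cs[a]
    · simp [he]
    · have hrec := inner_eq cs i (a + 1) hi (by omega)
      rw [hcast, hrec]
      simp [he]
  · have hae : a = cs.length := by omega
    subst hae
    rw [PySem.List.pyRange_one_eq_nil (by omega)]
    simp [fnr1Inner]
termination_by cs.length - a

-- the outer loop of A computes pvE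
lemma outer_eq (cs : List Char) (i : Nat) (hi : i ≤ cs.length) :
    fnr1Outer cs (PySem.List.pyRange (i : Int) (cs.length : Int) 1) = pvE cs i := by
  by_cases hlt : i < cs.length
  · rw [PySem.List.pyRange_one_cons (by exact_mod_cast hlt)]
    simp only [fnr1Outer]
    have hcast : ((i : Int) + 1) = ((i + 1 : Nat) : Int) := by push_cast; ring
    rw [hcast, inner_eq cs i (i + 1) hlt (by omega), pvE_succ cs i hlt]
    cases hc : (cs.drop (i + 1)).contains cs[i] with
    | true =>
      rw [outer_eq cs (i + 1) (by omega)]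
      simp
    | false =>
      have hnm : ¬ cs[i] ∈ cs.drop (i + 1) := by
        intro h; rw [List.contains_iff_mem.mpr h] at hc; simp at hc
      simp
  · have hae : i = cs.length := by omega
    subst hae
    rw [PySem.List.pyRange_one_eq_nil (by omega)]
    simp [fnr1Outer, pvE, List.drop_length, specF]
termination_by cs.length - i

-- the right-to-left loop of B: processing indices i-1 … 0 turns pvE cs i into pvE cs 0
lemma alt_loop (cs : List Char) (i : Nat) (hi : i ≤ cs.length)
    (seen : PySem.Set Char)
    (hseen : ∀ c, c ∈ seen ↔ c ∈ cs.drop i) :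
    ((PySem.List.pyRange ((i : Int) - 1) (-1) (-1)).foldl (fnr1AltStep cs)
      (seen, pvE cs i)).2 = pvE cs 0 := by
  induction i generalizing seen with
  | zero =>
    rw [PySem.List.pyRange_neg_one_eq_nil (by omega)]
    simp
  | succ i ih =>
    have hlt : i < cs.length := by omega
    rw [show ((i + 1 : Nat) : Int) - 1 = ((i : Nat) : Int) from by push_cast; ring]
    rw [PySem.List.pyRange_neg_one_cons (by omega)]
    simp only [List.foldl_cons]
    have hgi : PySem.List.pyGetD cs (i : Int) ' ' = cs[i] := by
      simp [PySem.List.pyGetD_natCast, List.getD_eq_getElem?_getD, hlt]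
    have hdrop : cs.drop i = cs[i] :: cs.drop (i + 1) := (List.getElem_cons_drop hlt).symm
    have hcont : PySem.Set.contains seen cs[i] = (cs.drop (i + 1)).contains cs[i] := by
      rw [Bool.eq_iff_iff]
      simp only [PySem.Set.contains_eq_listContains, List.contains_iff_mem]
      exact hseen cs[i]
    have hstep : fnr1AltStep cs (seen, pvE cs (i + 1)) (i : Int)
        = (PySem.Set.add seen cs[i], pvE cs i) := by
      simp only [fnr1AltStep, hgi, hcont]
      rw [pvE_succ cs i hlt]
    rw [hstep]
    refine ih (by omega) _ ?_
    intro c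
    rw [hdrop, PySem.Set.mem_add, List.mem_cons, hseen c]
    tauto

theorem fnr1_spec : Claim_equal_fnr1 := by
  unfold Claim_equal_fnr1
  intro s _
  unfold Spec_fnr1 fnr1 fnr1_alt
  set cs := s.toList with hcs
  have hA : fnr1Outer cs (PySem.List.pyRange 0 (cs.length : Int) 1) = pvE cs 0 := by
    have := outer_eq cs 0 (by omega)
    simpa using this
  have hEn : pvE cs cs.length = -1 := by
    simp [pvE, List.drop_length, specF]
  have hB := alt_loop cs cs.length (le_refl _) PySem.Set.empty (by
    intro c; simp [PySem.Set.empty, List.drop_length])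
  rw [hEn] at hB
  simp only [hA, hB]
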